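-- pv_equiv track=rewrite | github.com/mwg1378/intl-soccer-rankings | backtest/backtest/data/loader.py | tournament_to_importance
-- ===== SOURCE A (Python) =====
-- def tournament_to_importance(tournament: str) -> str:
--     t = tournament.lower()
--     if "friendly" in t:
--         return "FRIENDLY"
--     if "nations league" in t:
--         return "NATIONS_LEAGUE"
--     if any(w in t for w in ("qualification", "qualif", "qualifier")):
--         return "QUALIFIER"
--     if any(w in t for w in ("world cup", "euro", "copa am", "african cup",
--                             "asian cup", "gold cup", "concacaf")):
--         return "TOURNAMENT_GROUP"
--     if any(w in t for w in ("cup", "championship", "tournament")):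
--         return "TOURNAMENT_GROUP"
--     return "FRIENDLY"
-- ===== SOURCE B (Python) =====
-- # Single left-to-right scan over the lowered string: at each position check which
-- # keywords start there and keep the best (lowest) priority seen; index a label table.
-- LABELS = ["FRIENDLY", "NATIONS_LEAGUE", "QUALIFIER", "TOURNAMENT_GROUP", "FRIENDLY"]
-- KEYWORDS = [
--     ("friendly", 0),
--     ("nations league", 1),
--     ("qualification", 2), ("qualif", 2), ("qualifier", 2),
--     ("world cup", 3), ("euro", 3), ("copa am", 3), ("african cup", 3),
--     ("asian cup", 3), ("gold cup", 3), ("concacaf", 3),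
--     ("cup", 3), ("championship", 3), ("tournament", 3),
-- ]
--
-- def tournament_to_importance(tournament: str) -> str:
--     t = tournament.lower()
--     best = 4
--     for i in range(len(t)):
--         for w, p in KEYWORDS:
--             if p < best and t.startswith(w, i):
--                 best = p
--     return LABELS[best]
-- ===== Notes on version B (the rewrite author's own statement) =====
-- stated objective: alternative
-- what changed: Instead of A's ordered chain of whole-string substring-membership tests with early returns, B makes one left-to-right scan over the lowered string, at each position checking which keywords start there and accumulating the minimum priority seen, then indexes a label table with that priority.
import Mathlib
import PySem

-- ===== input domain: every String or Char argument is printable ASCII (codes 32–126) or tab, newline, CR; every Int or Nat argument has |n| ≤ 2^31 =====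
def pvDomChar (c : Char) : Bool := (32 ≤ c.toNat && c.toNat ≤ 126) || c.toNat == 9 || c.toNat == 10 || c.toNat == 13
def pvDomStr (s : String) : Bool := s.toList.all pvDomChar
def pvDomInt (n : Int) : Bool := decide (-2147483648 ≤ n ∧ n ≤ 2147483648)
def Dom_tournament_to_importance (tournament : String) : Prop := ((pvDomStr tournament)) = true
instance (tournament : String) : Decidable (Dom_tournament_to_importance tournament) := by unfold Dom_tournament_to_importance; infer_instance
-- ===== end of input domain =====

-- B replaces A's chain of substring-membership tests by a single left-to-right scan
-- over the lowered string that keeps the best (lowest) priority of any keyword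
-- starting at each position, then indexes a label table (objective: alternative).

-- ===== PORT A =====
def tournament_to_importance (tournament : String) : String :=
  let t := PySem.Str.lower tournament
  if PySem.Str.isIn "friendly" t then "FRIENDLY"
  else if PySem.Str.isIn "nations league" t then "NATIONS_LEAGUE"
  else if ["qualification", "qualif", "qualifier"].any (fun w => PySem.Str.isIn w t) then "QUALIFIER"
  else if ["world cup", "euro", "copa am", "african cup",
           "asian cup", "gold cup", "concacaf"].any (fun w => PySem.Str.isIn w t) then "TOURNAMENT_GROUP"
  else if ["cup", "championship", "tournament"].any (fun w => PySem.Str.isIn w t) then "TOURNAMENT_GROUP"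
  else "FRIENDLY"

-- ===== PORT B =====
def pvLabels : List String :=
  ["FRIENDLY", "NATIONS_LEAGUE", "QUALIFIER", "TOURNAMENT_GROUP", "FRIENDLY"]

def pvKeywords : List (List Char × Nat) :=
  [("friendly".toList, 0),
   ("nations league".toList, 1),
   ("qualification".toList, 2), ("qualif".toList, 2), ("qualifier".toList, 2),
   ("world cup".toList, 3), ("euro".toList, 3), ("copa am".toList, 3),
   ("african cup".toList, 3), ("asian cup".toList, 3), ("gold cup".toList, 3),
   ("concacaf".toList, 3), ("cup".toList, 3), ("championship".toList, 3),
   ("tournament".toList, 3)]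

-- t.startswith(w, i): for 0 ≤ i ≤ len(t) this is exactly "w is a prefix of t[i:]".
def tournament_to_importance_alt (tournament : String) : String :=
  let t := (PySem.Str.lower tournament).toList
  let best := (List.range t.length).foldl
    (fun best i => pvKeywords.foldl
      (fun best wp => if wp.2 < best ∧ wp.1.isPrefixOf (t.drop i) then wp.2 else best)
      best) 4
  pvLabels.getD best "FRIENDLY"

-- ===== PRECONDITION & SPEC =====
def Spec_tournament_to_importance (tournament : String) (out : String) : Prop := out = tournament_to_importance_alt tournament
instance (tournament : String) (out : String) : Decidable (Spec_tournament_to_importance tournament out) := by unfold Spec_tournament_to_importance; infer_instance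

-- ===== CLAIM (what is proved, stated in full; the proofs are below) =====
def Claim_equal_tournament_to_importance : Prop := ∀ (tournament : String), Dom_tournament_to_importance tournament → Spec_tournament_to_importance tournament (tournament_to_importance tournament)

-- ===== LEMMAS AND PROOFS =====

-- "some keyword of priority p occurs in t"
def pvMatches (t : List Char) (p : Nat) : Prop :=
  ∃ i < t.length, ∃ wp ∈ pvKeywords, wp.2 = p ∧ wp.1.isPrefixOf (t.drop i) = true

-- inner fold: the `wp.2 < best` guard computes a min over matched priorities
theorem pvInner_mem (t : List Char) (i : Nat) :
    ∀ (l : List (List Char × Nat)) (b : Nat),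
      (l.foldl (fun b wp => if wp.2 < b ∧ wp.1.isPrefixOf (t.drop i) then wp.2 else b) b) = b ∨
      ∃ wp ∈ l, wp.1.isPrefixOf (t.drop i) = true ∧
        (l.foldl (fun b wp => if wp.2 < b ∧ wp.1.isPrefixOf (t.drop i) then wp.2 else b) b) = wp.2 := by
  intro l
  induction l with
  | nil => intro b; left; rfl
  | cons hd tl ih =>
    intro b
    simp only [List.foldl_cons]
    rcases ih (if hd.2 < b ∧ hd.1.isPrefixOf (t.drop i) then hd.2 else b) with h | ⟨wp, hm, hp, he⟩
    · rw [h]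
      split_ifs with hc
      · exact Or.inr ⟨hd, List.mem_cons_self .., hc.2, rfl⟩
      · exact Or.inl rfl
    · exact Or.inr ⟨wp, List.mem_cons_of_mem _ hm, hp, he⟩

theorem pvInner_le (t : List Char) (i : Nat) :
    ∀ (l : List (List Char × Nat)) (b : Nat),
      (l.foldl (fun b wp => if wp.2 < b ∧ wp.1.isPrefixOf (t.drop i) then wp.2 else b) b) ≤ b ∧
      ∀ wp ∈ l, wp.1.isPrefixOf (t.drop i) = true →
        (l.foldl (fun b wp => if wp.2 < b ∧ wp.1.isPrefixOf (t.drop i) then wp.2 else b) b) ≤ wp.2 := by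
  intro l
  induction l with
  | nil => intro b; exact ⟨le_refl _, by simp⟩
  | cons hd tl ih =>
    intro b
    simp only [List.foldl_cons]
    obtain ⟨h1, h2⟩ := ih (if hd.2 < b ∧ hd.1.isPrefixOf (t.drop i) then hd.2 else b)
    constructor
    · refine le_trans h1 ?_; split_ifs with hc
      · omega
      · exact le_refl _
    · intro wp hm hp
      rcases List.mem_cons.mp hm with heq | hm'
      · refine le_trans h1 ?_
        rw [heq]
        split_ifs with hc
        · omega
        · have hnl : ¬ hd.2 < b := fun hlt => hc ⟨hlt, heq ▸ hp⟩
          omega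
      · exact h2 wp hm' hp

def pvBest (t : List Char) : Nat :=
  (List.range t.length).foldl
    (fun best i => pvKeywords.foldl
      (fun best wp => if wp.2 < best ∧ wp.1.isPrefixOf (t.drop i) then wp.2 else best)
      best) 4

theorem pvOuter_mem (t : List Char) :
    ∀ (L : List Nat) (b : Nat),
      (L.foldl (fun b i => pvKeywords.foldl
        (fun b wp => if wp.2 < b ∧ wp.1.isPrefixOf (t.drop i) then wp.2 else b) b) b) = b ∨
      ∃ i ∈ L, ∃ wp ∈ pvKeywords, wp.1.isPrefixOf (t.drop i) = true ∧
        (L.foldl (fun b i => pvKeywords.foldl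
          (fun b wp => if wp.2 < b ∧ wp.1.isPrefixOf (t.drop i) then wp.2 else b) b) b) = wp.2 := by
  intro L
  induction L with
  | nil => intro b; left; rfl
  | cons hd tl ih =>
    intro b
    simp only [List.foldl_cons]
    set b' := pvKeywords.foldl
      (fun b wp => if wp.2 < b ∧ wp.1.isPrefixOf (t.drop hd) then wp.2 else b) b with hb'
    rcases ih b' with h | ⟨i, hi, wp, hm, hp, he⟩
    · rw [h]
      rcases pvInner_mem t hd pvKeywords b with h' | ⟨wp, hm, hp, he⟩
      · exact Or.inl h'
      · exact Or.inr ⟨hd, List.mem_cons_self .., wp, hm, hp, he⟩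
    · exact Or.inr ⟨i, List.mem_cons_of_mem _ hi, wp, hm, hp, he⟩

theorem pvOuter_le (t : List Char) :
    ∀ (L : List Nat) (b : Nat),
      (L.foldl (fun b i => pvKeywords.foldl
        (fun b wp => if wp.2 < b ∧ wp.1.isPrefixOf (t.drop i) then wp.2 else b) b) b) ≤ b ∧
      ∀ i ∈ L, ∀ wp ∈ pvKeywords, wp.1.isPrefixOf (t.drop i) = true →
        (L.foldl (fun b i => pvKeywords.foldl
          (fun b wp => if wp.2 < b ∧ wp.1.isPrefixOf (t.drop i) then wp.2 else b) b) b) ≤ wp.2 := by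
  intro L
  induction L with
  | nil => intro b; exact ⟨le_refl _, by simp⟩
  | cons hd tl ih =>
    intro b
    simp only [List.foldl_cons]
    set b' := pvKeywords.foldl
      (fun b wp => if wp.2 < b ∧ wp.1.isPrefixOf (t.drop hd) then wp.2 else b) b with hb'
    obtain ⟨h1, h2⟩ := ih b'
    refine ⟨le_trans h1 (pvInner_le t hd pvKeywords b).1, ?_⟩
    intro i hi wp hm hp
    rcases List.mem_cons.mp hi with rfl | hi'
    · exact le_trans h1 ((pvInner_le t i pvKeywords b).2 wp hm hp)
    · exact h2 i hi' wp hm hp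

-- pvBest is 4 (nothing matched) or the priority of some matched keyword
theorem pvBest_mem (t : List Char) : pvBest t = 4 ∨ pvMatches t (pvBest t) := by
  rcases pvOuter_mem t (List.range t.length) 4 with h | ⟨i, hi, wp, hm, hp, he⟩
  · exact Or.inl h
  · exact Or.inr ⟨i, List.mem_range.mp hi, wp, hm, he.symm, hp⟩

-- pvBest is a lower bound on every matched priority
theorem pvBest_le (t : List Char) (p : Nat) (h : pvMatches t p) : pvBest t ≤ p := by
  obtain ⟨i, hi, wp, hm, hp2, hpre⟩ := h
  rw [← hp2]
  exact (pvOuter_le t (List.range t.length) 4).2 i (List.mem_range.mpr hi) wp hm hpre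

theorem pvKeywords_ne_nil : ∀ wp ∈ pvKeywords, wp.1 ≠ [] := by decide

theorem pvKeywords_lt_four : ∀ wp ∈ pvKeywords, wp.2 < 4 := by decide

-- pvMatches unpacked: a keyword of priority p is an infix of t
theorem pvMatches_iff (t : List Char) (p : Nat) :
    pvMatches t p ↔ ∃ wp ∈ pvKeywords, wp.2 = p ∧ PySem.Chars.isIn wp.1 t = true := by
  constructor
  · rintro ⟨i, _, wp, hm, hp, hpre⟩
    refine ⟨wp, hm, hp, ?_⟩
    exact (PySem.Chars.exists_prefix_drop_iff_isIn wp.1 t).mp ⟨i, List.isPrefixOf_iff_prefix.mp hpre⟩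
  · rintro ⟨wp, hm, hp, hin⟩
    obtain ⟨j, hj⟩ := (PySem.Chars.exists_prefix_drop_iff_isIn wp.1 t).mpr hin
    have hne : wp.1 ≠ [] := pvKeywords_ne_nil wp hm
    have hjlt : j < t.length := by
      by_contra hge
      rw [List.drop_eq_nil_of_le (by omega)] at hj
      exact hne (List.prefix_nil.mp hj)
    exact ⟨j, hjlt, wp, hm, hp, List.isPrefixOf_iff_prefix.mpr hj⟩

theorem pvMatches_lt_four (t : List Char) (p : Nat) (h : pvMatches t p) : p < 4 := by
  obtain ⟨_, _, wp, hm, hp, _⟩ := h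
  have := pvKeywords_lt_four wp hm
  omega

-- ===== VERDICT (by name: the statement is the Claim_ definition above) =====
theorem tournament_to_importance_spec : Claim_equal_tournament_to_importance := by
  intro s _
  unfold Spec_tournament_to_importance tournament_to_importance tournament_to_importance_alt
  simp only [PySem.Str.isIn_eq, List.any_cons, List.any_nil, Bool.or_false, Bool.or_eq_true]
  set t := (PySem.Str.lower s).toList with ht
  have hbest : (List.range t.length).foldl
      (fun best i => pvKeywords.foldl
        (fun best wp => if wp.2 < best ∧ wp.1.isPrefixOf (t.drop i) then wp.2 else best)
        best) 4 = pvBest t := rfl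
  rw [hbest]
  have m0 : pvMatches t 0 ↔ PySem.Chars.isIn "friendly".toList t = true := by
    rw [pvMatches_iff]
    simp only [pvKeywords, List.exists_mem_cons_iff, List.not_mem_nil, false_and,
      exists_false, or_false]
    simp
  have m1 : pvMatches t 1 ↔ PySem.Chars.isIn "nations league".toList t = true := by
    rw [pvMatches_iff]
    simp only [pvKeywords, List.exists_mem_cons_iff, List.not_mem_nil, false_and,
      exists_false, or_false]
    simp
  have m2 : pvMatches t 2 ↔ (PySem.Chars.isIn "qualification".toList t = true ∨
      PySem.Chars.isIn "qualif".toList t = true ∨ PySem.Chars.isIn "qualifier".toList t = true) := by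
    rw [pvMatches_iff]
    simp only [pvKeywords, List.exists_mem_cons_iff, List.not_mem_nil, false_and,
      exists_false, or_false]
    simp
  have m3 : pvMatches t 3 ↔ (PySem.Chars.isIn "world cup".toList t = true ∨
      PySem.Chars.isIn "euro".toList t = true ∨ PySem.Chars.isIn "copa am".toList t = true ∨
      PySem.Chars.isIn "african cup".toList t = true ∨ PySem.Chars.isIn "asian cup".toList t = true ∨
      PySem.Chars.isIn "gold cup".toList t = true ∨ PySem.Chars.isIn "concacaf".toList t = true ∨
      PySem.Chars.isIn "cup".toList t = true ∨ PySem.Chars.isIn "championship".toList t = true ∨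
      PySem.Chars.isIn "tournament".toList t = true) := by
    rw [pvMatches_iff]
    simp only [pvKeywords, List.exists_mem_cons_iff, List.not_mem_nil, false_and,
      exists_false, or_false]
    simp
  split_ifs with h0 h1 h2 h3 h4
  · -- friendly matched: pvBest = 0
    have hle := pvBest_le t 0 (m0.mpr h0)
    have hz : pvBest t = 0 := by omega
    rw [hz]; rfl
  · have hle := pvBest_le t 1 (m1.mpr h1)
    have hz : pvBest t = 1 := by
      rcases pvBest_mem t with h | hmm
      · omega
      · have e0 : pvBest t ≠ 0 := fun he => h0 (m0.mp (he ▸ hmm))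
        omega
    rw [hz]; rfl
  · have hle := pvBest_le t 2 (m2.mpr h2)
    have hz : pvBest t = 2 := by
      rcases pvBest_mem t with h | hmm
      · omega
      · have e0 : pvBest t ≠ 0 := fun he => h0 (m0.mp (he ▸ hmm))
        have e1 : pvBest t ≠ 1 := fun he => h1 (m1.mp (he ▸ hmm))
        omega
    rw [hz]; rfl
  · have hle := pvBest_le t 3 (m3.mpr (by
      rcases h3 with h|h|h|h|h|h|h
      · exact Or.inl h
      · exact Or.inr (Or.inl h)
      · exact Or.inr (Or.inr (Or.inl h))
      · exact Or.inr (Or.inr (Or.inr (Or.inl h)))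
      · exact Or.inr (Or.inr (Or.inr (Or.inr (Or.inl h))))
      · exact Or.inr (Or.inr (Or.inr (Or.inr (Or.inr (Or.inl h)))))
      · exact Or.inr (Or.inr (Or.inr (Or.inr (Or.inr (Or.inr (Or.inl h))))))
      ))
    have hz : pvBest t = 3 := by
      rcases pvBest_mem t with h | hmm
      · omega
      · have e0 : pvBest t ≠ 0 := fun he => h0 (m0.mp (he ▸ hmm))
        have e1 : pvBest t ≠ 1 := fun he => h1 (m1.mp (he ▸ hmm))
        have e2 : pvBest t ≠ 2 := fun he => h2 (m2.mp (he ▸ hmm))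
        omega
    rw [hz]; rfl
  · have hle := pvBest_le t 3 (m3.mpr (by
      rcases h4 with h|h|h
      · exact Or.inr (Or.inr (Or.inr (Or.inr (Or.inr (Or.inr (Or.inr (Or.inl h)))))))
      · exact Or.inr (Or.inr (Or.inr (Or.inr (Or.inr (Or.inr (Or.inr (Or.inr (Or.inl h))))))))
      · exact Or.inr (Or.inr (Or.inr (Or.inr (Or.inr (Or.inr (Or.inr (Or.inr (Or.inr h))))))))
      ))
    have hz : pvBest t = 3 := by
      rcases pvBest_mem t with h | hmm
      · omega
      · have e0 : pvBest t ≠ 0 := fun he => h0 (m0.mp (he ▸ hmm))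
        have e1 : pvBest t ≠ 1 := fun he => h1 (m1.mp (he ▸ hmm))
        have e2 : pvBest t ≠ 2 := fun he => h2 (m2.mp (he ▸ hmm))
        omega
    rw [hz]; rfl
  · -- nothing matched: pvBest = 4
    have hz : pvBest t = 4 := by
      rcases pvBest_mem t with h | hmm
      · exact h
      · have hlt := pvMatches_lt_four t _ hmm
        have e0 : pvBest t ≠ 0 := fun he => h0 (m0.mp (he ▸ hmm))
        have e1 : pvBest t ≠ 1 := fun he => h1 (m1.mp (he ▸ hmm))
        have e2 : pvBest t ≠ 2 := fun he => h2 (m2.mp (he ▸ hmm))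
        have e3 : pvBest t ≠ 3 := by
          intro he
          rcases m3.mp (he ▸ hmm) with h|h|h|h|h|h|h|h|h|h
          · exact h3 (Or.inl h)
          · exact h3 (Or.inr (Or.inl h))
          · exact h3 (Or.inr (Or.inr (Or.inl h)))
          · exact h3 (Or.inr (Or.inr (Or.inr (Or.inl h))))
          · exact h3 (Or.inr (Or.inr (Or.inr (Or.inr (Or.inl h)))))
          · exact h3 (Or.inr (Or.inr (Or.inr (Or.inr (Or.inr (Or.inl h))))))
          · exact h3 (Or.inr (Or.inr (Or.inr (Or.inr (Or.inr (Or.inr h))))))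
          · exact h4 (Or.inl h)
          · exact h4 (Or.inr (Or.inl h))
          · exact h4 (Or.inr (Or.inr h))
        omega
    rw [hz]; rfl
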